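-- pv_equiv track=rewrite | github.com/monlaf-sfk/Guardian | db/utils.py | remove_escapes
-- ===== SOURCE A (Python) =====
-- def remove_escapes(text: str) -> str:
--     counter = 0
--     res = ""
--     is_escaped = False
--     while counter < len(text):
--         if is_escaped:
--             res += text[counter]
--             is_escaped = False
--         elif text[counter] == "\\":
--             is_escaped = True
--         else:
--             res += text[counter]
--         counter += 1
--     return res
-- ===== SOURCE B (Python) =====
-- def remove_escapes(text: str) -> str:
--     out = []
--     i = 0
--     n = len(text)
--     while i < n:
--         if text[i] == "\\":
--             if i + 1 < n:
--                 out.append(text[i + 1])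
--             i += 2
--         else:
--             out.append(text[i])
--             i += 1
--     return "".join(out)
-- ===== Notes on version B (the rewrite author's own statement) =====
-- stated objective: faster
-- what changed: Replaces A's one-char-at-a-time scan with a boolean is_escaped flag and repeated string concatenation by a flagless two-pointer scan that consumes a backslash together with its escaped character in one step, collecting output characters in a list joined once at the end.
import Mathlib
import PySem

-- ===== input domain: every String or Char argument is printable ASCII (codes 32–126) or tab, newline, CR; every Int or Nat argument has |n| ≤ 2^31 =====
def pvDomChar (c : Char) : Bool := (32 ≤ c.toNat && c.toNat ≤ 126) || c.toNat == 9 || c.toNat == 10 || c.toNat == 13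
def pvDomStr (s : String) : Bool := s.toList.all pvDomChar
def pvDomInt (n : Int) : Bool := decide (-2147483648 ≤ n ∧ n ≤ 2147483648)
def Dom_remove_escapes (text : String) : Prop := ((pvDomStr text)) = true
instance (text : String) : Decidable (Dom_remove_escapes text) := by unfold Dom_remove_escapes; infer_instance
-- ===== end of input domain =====

-- B removes backslash escapes with a flagless scan that consumes '\' together with its
-- escaped character in one step (alternative decomposition; same O(n) cost).

-- ===== PORT A =====
-- A's while loop: one character per step, boolean is_escaped flag, res accumulated by +=.
def removeEscapesLoopA (chars : List Char) (isEscaped : Bool) (res : List Char) : List Char :=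
  match chars with
  | [] => res
  | c :: rest =>
    if isEscaped then removeEscapesLoopA rest false (res ++ [c])
    else if c = '\\' then removeEscapesLoopA rest true res
    else removeEscapesLoopA rest false (res ++ [c])

def remove_escapes (text : String) : String :=
  String.ofList (removeEscapesLoopA text.toList false [])

-- ===== PORT B =====
-- B's while loop: on '\' consume two characters (emit the second if present), else emit one.
def removeEscapesLoopB (chars : List Char) : List Char :=
  match chars with
  | [] => []
  | c :: rest =>
    if c = '\\' then
      match rest with
      | [] => []
      | d :: rest2 => d :: removeEscapesLoopB rest2
    else c :: removeEscapesLoopB rest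

def remove_escapes_alt (text : String) : String :=
  String.ofList (removeEscapesLoopB text.toList)

-- ===== PRECONDITION & SPEC =====
def Spec_remove_escapes (text : String) (out : String) : Prop := out = remove_escapes_alt text
instance (text : String) (out : String) : Decidable (Spec_remove_escapes text out) := by unfold Spec_remove_escapes; infer_instance

-- ===== CLAIM (what is proved, stated in full; the proofs are below) =====
def Claim_equal_remove_escapes : Prop := ∀ (text : String), Dom_remove_escapes text → Spec_remove_escapes text (remove_escapes text)

-- ===== LEMMAS AND PROOFS =====
theorem loopA_eq_loopB (chars : List Char) : ∀ (res : List Char),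
    removeEscapesLoopA chars false res = res ++ removeEscapesLoopB chars := by
  induction chars using removeEscapesLoopB.induct with
  | case1 => intro res; simp [removeEscapesLoopA, removeEscapesLoopB]
  | case2 => intro res; simp [removeEscapesLoopA, removeEscapesLoopB]
  | case3 d rest2 ih =>
    intro res
    simp [removeEscapesLoopA, removeEscapesLoopB, ih]
  | case4 c rest h ih =>
    intro res
    rw [removeEscapesLoopA]
    rw [removeEscapesLoopB.eq_def]
    simp [h, ih]

-- ===== VERDICT (by name: the statement is the Claim_ definition above) =====
theorem remove_escapes_spec : Claim_equal_remove_escapes := by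
  intro text _
  unfold Spec_remove_escapes remove_escapes remove_escapes_alt
  rw [loopA_eq_loopB]
  simp
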